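-- pv_equiv track=rewrite | github.com/femtomc/bicameral | bicamrl/core/feedback_processor.py | _pattern_matches_actions
-- ===== SOURCE A (Python) =====
-- from typing import Any, Dict, Optional
--
-- def _pattern_matches_actions(pattern: Dict, actions: list) -> bool:
--     """Check if a pattern matches recent actions."""
--     pattern_seq = pattern.get("sequence", [])
--     if not pattern_seq:
--         return False
--
--     action_names = [a.get("action") for a in actions if a.get("action")]
--
--     # Check if pattern sequence appears in recent actions
--     for i in range(len(action_names) - len(pattern_seq) + 1):
--         if action_names[i : i + len(pattern_seq)] == pattern_seq:
--             return True
--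
--     return False
-- ===== SOURCE B (Python) =====
-- def _pattern_matches_actions(pattern, actions) -> bool:
--     """Single streaming pass: keep a rolling window of the last len(seq)
--     action names and compare it to the pattern sequence as we go."""
--     seq = pattern.get("sequence", [])
--     if not seq:
--         return False
--     m = len(seq)
--     window = []
--     for action in actions:
--         name = action.get("action")
--         if not name:
--             continue
--         window.append(name)
--         if len(window) > m:
--             window.pop(0)
--         if window == seq:
--             return True
--     return False
-- ===== Notes on version B (the rewrite author's own statement) =====
-- stated objective: alternative
-- what changed: A builds the full action-name list and then slices it at every start index; B makes one streaming pass over actions, maintaining a rolling window of the last len(sequence) names, comparing it after each name and returning early on a match.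
import Mathlib
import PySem

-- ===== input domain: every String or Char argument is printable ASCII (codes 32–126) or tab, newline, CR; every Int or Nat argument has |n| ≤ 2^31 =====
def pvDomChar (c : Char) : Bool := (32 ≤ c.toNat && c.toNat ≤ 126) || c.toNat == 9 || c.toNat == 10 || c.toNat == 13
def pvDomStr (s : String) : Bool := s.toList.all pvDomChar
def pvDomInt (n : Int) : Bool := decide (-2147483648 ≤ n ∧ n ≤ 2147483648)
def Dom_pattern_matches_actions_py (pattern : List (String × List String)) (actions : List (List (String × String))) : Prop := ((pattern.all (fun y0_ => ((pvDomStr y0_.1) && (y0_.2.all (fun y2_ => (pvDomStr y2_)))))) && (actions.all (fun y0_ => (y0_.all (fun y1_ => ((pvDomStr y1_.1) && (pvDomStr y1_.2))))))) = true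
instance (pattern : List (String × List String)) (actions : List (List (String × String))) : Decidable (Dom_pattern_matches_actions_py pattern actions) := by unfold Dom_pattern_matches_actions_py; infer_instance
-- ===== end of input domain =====

-- B replaces A's two passes (name list, then slice at each start index) by one streaming
-- pass with a rolling window of the last len(sequence) names; objective: alternative.

-- ===== PORT A =====
-- the for-loop over range(len(action_names) - len(pattern_seq) + 1) with early return
def pvLoopA (seq names : List String) : List Int → Bool
  | [] => false
  | i :: rest =>
    if PySem.List.slice names (some i) (some (i + (seq.length : Int))) = seq then true
    else pvLoopA seq names rest

def pattern_matches_actions_py (pattern : List (String × List String)) (actions : List (List (String × String))) : Bool :=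
  let pattern_seq := (List.lookup "sequence" pattern).getD []
  if pattern_seq = [] then false
  else
    -- [a.get("action") for a in actions if a.get("action")]
    let action_names := actions.foldl (fun acc a =>
      match List.lookup "action" a with
      | some s => if s ≠ "" then acc ++ [s] else acc
      | none => acc) []
    pvLoopA pattern_seq action_names
      (PySem.List.pyRange 0 ((action_names.length : Int) - (pattern_seq.length : Int) + 1) 1)

-- ===== PORT B =====
-- the streaming loop: window of the last m names, early return on a match
def pvGoB (seq : List String) (m : Nat) (w : List String) : List (List (String × String)) → Bool
  | [] => false
  | a :: rest =>
    match List.lookup "action" a with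
    | some s =>
      if s ≠ "" then
        let w1 := w ++ [s]
        let w2 := if m < w1.length then w1.tail else w1
        if w2 = seq then true else pvGoB seq m w2 rest
      else pvGoB seq m w rest
    | none => pvGoB seq m w rest

def pattern_matches_actions_py_alt (pattern : List (String × List String)) (actions : List (List (String × String))) : Bool :=
  let seq := (List.lookup "sequence" pattern).getD []
  if seq = [] then false
  else pvGoB seq seq.length [] actions

-- ===== PRECONDITION & SPEC =====
def Spec_pattern_matches_actions_py (pattern : List (String × List String)) (actions : List (List (String × String))) (out : Bool) : Prop := out = pattern_matches_actions_py_alt pattern actions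
instance (pattern : List (String × List String)) (actions : List (List (String × String))) (out : Bool) : Decidable (Spec_pattern_matches_actions_py pattern actions out) := by unfold Spec_pattern_matches_actions_py; infer_instance

-- ===== CLAIM (what is proved, stated in full; the proofs are below) =====
def Claim_equal_pattern_matches_actions_py : Prop := ∀ (pattern : List (String × List String)) (actions : List (List (String × String))), Dom_pattern_matches_actions_py pattern actions → Spec_pattern_matches_actions_py pattern actions (pattern_matches_actions_py pattern actions)

-- ===== LEMMAS AND PROOFS =====

-- the filtered name list, as a filterMap (proof-side view of both ports' filtering)
def pvNames (actions : List (List (String × String))) : List String :=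
  actions.filterMap (fun a =>
    match List.lookup "action" a with
    | some s => if s ≠ "" then some s else none
    | none => none)

-- A's foldl comprehension appends pvNames
lemma pvFoldl_names (actions : List (List (String × String))) (acc : List String) :
    actions.foldl (fun acc a =>
      match List.lookup "action" a with
      | some s => if s ≠ "" then acc ++ [s] else acc
      | none => acc) acc = acc ++ pvNames actions := by
  induction actions generalizing acc with
  | nil => simp [pvNames]
  | cons a rest ih =>
    rw [List.foldl_cons, ih]
    cases h : List.lookup "action" a with
    | none => simp [pvNames, h]
    | some s =>
      by_cases hs : s = "" <;>
        simp [pvNames, h, hs]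

-- the last-m-elements view of B's window
def pvLastN (m : Nat) (l : List String) : List String := l.drop (l.length - m)

lemma pvLastN_suffix (m : Nat) (l : List String) : pvLastN m l <:+ l :=
  List.drop_suffix _ _

lemma pvSuffix_eq_lastN {seq l : List String} (h : seq <:+ l) :
    seq = pvLastN seq.length l := by
  obtain ⟨u, rfl⟩ := h
  simp [pvLastN, List.length_append]

lemma pvLastN_append_singleton (m : Nat) (hm : 0 < m) (p : List String) (s : String) :
    pvLastN m (p ++ [s]) =
      (if m < (pvLastN m p ++ [s]).length then (pvLastN m p ++ [s]).tail
       else pvLastN m p ++ [s]) := by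
  by_cases hlt : p.length < m
  · have h0 : p.length - m = 0 := by omega
    have h1 : p.length + 1 - m = 0 := by omega
    simp [pvLastN, h0, h1, List.length_append]
    omega
  · rw [Nat.not_lt] at hlt
    have hlen : (pvLastN m p).length = m := by
      simp [pvLastN]; omega
    have hcond : m < (pvLastN m p ++ [s]).length := by
      simp [List.length_append, hlen]
    rw [if_pos hcond]
    have hne : pvLastN m p ≠ [] := by
      intro h; rw [h] at hlen; simp at hlen; omega
    rw [List.tail_append_of_ne_nil hne]
    have : (pvLastN m p).tail = p.drop (p.length - m + 1) := by
      simp [pvLastN, List.tail_drop]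
    rw [this]
    have hdrop : (p ++ [s]).drop (p.length + 1 - m) = p.drop (p.length + 1 - m) ++ [s] := by
      rw [List.drop_append_of_le_length (by omega)]
    simp [pvLastN, List.length_append, hdrop]
    congr 1
    omega

-- B's loop finds exactly the occurrences ending strictly inside the remaining actions
lemma pvGoB_iff (seq : List String) (hm : seq ≠ []) (acts : List (List (String × String)))
    (p : List String) :
    pvGoB seq seq.length (pvLastN seq.length p) acts = true ↔
      ∃ q, q <+: pvNames acts ∧ q ≠ [] ∧ seq <:+ p ++ q := by
  induction acts generalizing p with
  | nil =>
    simp only [pvGoB, pvNames, List.filterMap_nil]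
    constructor
    · intro h; cases h
    · rintro ⟨q, hq, hne, _⟩
      exact absurd (List.prefix_nil.mp hq) hne
  | cons a rest ih =>
    have hmpos : 0 < seq.length := List.length_pos_of_ne_nil hm
    cases hl : List.lookup "action" a with
    | none =>
      have hn : pvNames (a :: rest) = pvNames rest := by simp [pvNames, hl]
      rw [hn]
      simp only [pvGoB, hl]
      exact ih p
    | some s =>
      by_cases hs : s = ""
      · have hn : pvNames (a :: rest) = pvNames rest := by simp [pvNames, hl, hs]
        rw [hn]
        simp only [pvGoB, hl]
        rw [if_neg (by simp [hs])]
        exact ih p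
      · have hn : pvNames (a :: rest) = s :: pvNames rest := by simp [pvNames, hl, hs]
        rw [hn]
        have hunfold : pvGoB seq seq.length (pvLastN seq.length p) (a :: rest) =
            (if pvLastN seq.length (p ++ [s]) = seq then true
             else pvGoB seq seq.length (pvLastN seq.length (p ++ [s])) rest) := by
          simp only [pvGoB, hl]
          rw [if_pos hs, ← pvLastN_append_singleton seq.length hmpos p s]
        rw [hunfold]
        by_cases hmatch : pvLastN seq.length (p ++ [s]) = seq
        · rw [if_pos hmatch]
          constructor
          · intro _
            refine ⟨[s], ⟨pvNames rest, rfl⟩, by simp, ?_⟩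
            have : seq <:+ p ++ [s] := hmatch ▸ pvLastN_suffix _ _
            simpa using this
          · intro _; rfl
        · rw [if_neg hmatch, ih (p ++ [s])]
          constructor
          · rintro ⟨q, hq, hne, hsuf⟩
            obtain ⟨t, ht⟩ := hq
            exact ⟨s :: q, ⟨t, by simp [ht]⟩, by simp, by
              simpa [List.append_assoc] using hsuf⟩
          · rintro ⟨q, hq, hne, hsuf⟩
            cases q with
            | nil => exact absurd rfl hne
            | cons x q' =>
              obtain ⟨t, ht⟩ := hq
              have hx : x = s := by
                have := congrArg (fun l => l.head?) ht
                simpa using this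
              have hq' : q' <+: pvNames rest := ⟨t, by
                have := congrArg List.tail ht
                simpa using this⟩
              cases q' with
              | nil =>
                exfalso
                apply hmatch
                have hsuf' : seq <:+ p ++ [s] := by
                  rw [hx] at hsuf
                  simpa using hsuf
                exact (pvSuffix_eq_lastN hsuf').symm
              | cons y q'' =>
                refine ⟨y :: q'', hq', by simp, ?_⟩
                rw [hx] at hsuf
                simpa [List.append_assoc] using hsuf

-- infix as "suffix of a prefix"
lemma pvInfix_iff_suffix_prefix (seq names : List String) (hm : seq ≠ []) :
    (seq <:+: names) ↔ ∃ q, q <+: names ∧ q ≠ [] ∧ seq <:+ q := by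
  constructor
  · rintro ⟨u, v, rfl⟩
    refine ⟨u ++ seq, ⟨v, by simp [List.append_assoc]⟩, ?_, ⟨u, rfl⟩⟩
    simp [hm]
  · rintro ⟨q, ⟨t, rfl⟩, _, ⟨u, rfl⟩⟩
    exact ⟨u, t, by simp [List.append_assoc]⟩

-- A's loop is true iff seq is an infix of names
lemma pvLoopA_iff (seq names : List String) :
    pvLoopA seq names
      (PySem.List.pyRange 0 ((names.length : Int) - (seq.length : Int) + 1) 1) = true ↔
      seq <:+: names := by
  have hany : ∀ is : List Int,
      pvLoopA seq names is = true ↔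
        ∃ i ∈ is, PySem.List.slice names (some i) (some (i + (seq.length : Int))) = seq := by
    intro is
    induction is with
    | nil => simp [pvLoopA]
    | cons i rest ih =>
      by_cases h : PySem.List.slice names (some i) (some (i + (seq.length : Int))) = seq
      · simp [pvLoopA, h]
      · simp [pvLoopA, h, ih]
  rw [hany]
  constructor
  · rintro ⟨i, hi, hslice⟩
    rw [PySem.List.mem_pyRange_one] at hi
    obtain ⟨hi0, _⟩ := hi
    lift i to ℕ using hi0 with k
    rw [show ((k : Int) + (seq.length : Int)) = ((k + seq.length : ℕ) : Int) by push_cast; ring,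
      PySem.List.slice_natCast] at hslice
    have hslice' : (names.drop k).take seq.length = seq := by
      simpa using hslice
    rw [List.infix_iff_prefix_suffix]
    have hpre := List.take_prefix seq.length (names.drop k)
    rw [hslice'] at hpre
    exact ⟨names.drop k, hpre, List.drop_suffix _ _⟩
  · rintro ⟨u, v, rfl⟩
    refine ⟨(u.length : Int), ?_, ?_⟩
    · rw [PySem.List.mem_pyRange_one]
      constructor
      · exact_mod_cast Nat.zero_le _
      · simp [List.length_append]
        omega
    · rw [show ((u.length : Int) + (seq.length : Int)) = ((u.length + seq.length : ℕ) : Int) by push_cast; ring,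
        PySem.List.slice_natCast]
      have h1 : (u ++ (seq ++ v)).drop u.length = seq ++ v := by
        simp
      rw [show u ++ seq ++ v = u ++ (seq ++ v) by simp [List.append_assoc], h1]
      simp

-- ===== VERDICT (by name: the statement is the Claim_ definition above) =====
theorem pattern_matches_actions_py_spec : Claim_equal_pattern_matches_actions_py := by
  intro pattern actions _
  unfold Spec_pattern_matches_actions_py
  unfold pattern_matches_actions_py pattern_matches_actions_py_alt
  set seq := (List.lookup "sequence" pattern).getD [] with hseq
  by_cases h : seq = []
  · simp [h]
  · simp only [if_neg h]
    rw [pvFoldl_names, List.nil_append, Bool.eq_iff_iff,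
      pvLoopA_iff seq (pvNames actions)]
    have hgo := pvGoB_iff seq h actions []
    have h0 : pvLastN seq.length [] = [] := by simp [pvLastN]
    rw [h0] at hgo
    simp only [List.nil_append] at hgo
    rw [hgo]
    exact pvInfix_iff_suffix_prefix seq (pvNames actions) h
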